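-- pv_equiv track=rewrite | github.com/buktop72/pypro | 5_regular/main.py | duble_dict
-- ===== SOURCE A (Python) =====
-- def duble_dict(ls): # ф-я принимает список, возвращает словарь с дублями: {'Мартиняхин': 2, 'Лагунцов': 2}
--     d = {}
--     for i in ls: # считаем количество вхождений каждого элемета списка
--         key = i[0]
--         if key in d:
--             d[key] += 1
--         else:
--             d[key] = 1
--     d_double = {}
--     for k, v in d.items(): # Оставляем только повторяющиеся данные
--         if v > 1:
--             d_double[k] = v
--     return d_double
-- ===== SOURCE B (Python) =====
-- def duble_dict(ls):
--     d_double = {}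
--     rem = [i[0] for i in ls]
--     while rem:
--         k = rem[0]
--         rest = [x for x in rem if x != k]
--         c = len(rem) - len(rest)
--         if c > 1:
--             d_double[k] = c
--         rem = rest
--     return d_double
-- ===== Notes on version B (the rewrite author's own statement) =====
-- stated objective: alternative
-- what changed: B replaces A's dict tally plus filtering pass by a partition worklist: it repeatedly takes the first remaining key, removes all its occurrences from the worklist in one partition step, and records the key with the length difference as its count when that difference exceeds 1.
import Mathlib
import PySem

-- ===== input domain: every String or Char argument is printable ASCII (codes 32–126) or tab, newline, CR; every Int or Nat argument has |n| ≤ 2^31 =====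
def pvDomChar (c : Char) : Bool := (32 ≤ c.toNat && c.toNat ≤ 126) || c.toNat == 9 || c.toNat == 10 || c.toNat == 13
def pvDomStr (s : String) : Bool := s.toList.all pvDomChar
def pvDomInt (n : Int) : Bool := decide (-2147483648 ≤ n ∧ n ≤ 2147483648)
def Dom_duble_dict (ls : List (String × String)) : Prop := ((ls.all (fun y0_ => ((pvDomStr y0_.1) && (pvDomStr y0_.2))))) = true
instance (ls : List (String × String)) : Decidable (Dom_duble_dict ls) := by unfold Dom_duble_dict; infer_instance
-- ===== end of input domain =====

-- B replaces A's count-everything dict plus filtering pass by a partition worklist that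
-- consumes the key list, extracting all occurrences of one key per step (objective: alternative).

-- ===== PORT A =====
def duble_dict (ls : List (String × String)) : List (String × Int) :=
  let d : PySem.Dict String Int :=
    ls.foldl (fun d i =>
      let key := i.1
      if d.contains key then d.modify key 0 (· + 1) else d.insert key 1)
      PySem.Dict.empty
  let d_double : PySem.Dict String Int :=
    d.items.foldl (fun dd kv => if kv.2 > 1 then dd.insert kv.1 kv.2 else dd)
      PySem.Dict.empty
  d_double.items

-- ===== PORT B =====
-- the while loop of Source B: consume the worklist `rem`, one distinct key per step
def pvLoop : List String → PySem.Dict String Int → PySem.Dict String Int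
  | [], d_double => d_double
  | k :: t, d_double =>
    let rest := (k :: t).filter (fun x => x != k)
    let c : Int := (((k :: t).length : Int) - (rest.length : Int))
    pvLoop rest (if c > 1 then d_double.insert k c else d_double)
termination_by rem _ => rem.length
decreasing_by
  simp only [List.filter_cons, bne_self_eq_false, Bool.false_eq_true, if_false, List.length_cons]
  exact Nat.lt_succ_of_le (List.length_filter_le _ t)

def duble_dict_alt (ls : List (String × String)) : List (String × Int) :=
  let rem := ls.map (fun i => i.1)
  (pvLoop rem PySem.Dict.empty).items

-- ===== PRECONDITION & SPEC =====
def Spec_duble_dict (ls : List (String × String)) (out : List (String × Int)) : Prop := out = duble_dict_alt ls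
instance (ls : List (String × String)) (out : List (String × Int)) : Decidable (Spec_duble_dict ls out) := by unfold Spec_duble_dict; infer_instance

-- ===== CLAIM (what is proved, stated in full; the proofs are below) =====
def Claim_equal_duble_dict : Prop := ∀ (ls : List (String × String)), Dom_duble_dict ls → Spec_duble_dict ls (duble_dict ls)

-- ===== LEMMAS AND PROOFS =====

-- both programs compute this canonical value: the duplicated keys in first-occurrence
-- order, each with its total count
def pvCanon (l : List String) : List (String × Int) :=
  ((PySem.Set.ofList l).filter (fun k => decide (((l.count k : Int)) > 1))).map
    (fun k => (k, (l.count k : Int)))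

-- A's counting step is exactly Counter's step
theorem countStep_eq_modify (d : PySem.Dict String Int) (k : String) :
    (if d.contains k then d.modify k 0 (· + 1) else d.insert k 1)
      = d.modify k 0 (· + 1) := by
  by_cases h : d.contains k = true
  · simp [h]
  · simp only [Bool.not_eq_true] at h
    simp [h, PySem.Dict.modify, PySem.Dict.getD_of_not_contains _ _ h]

-- A's first loop produces Counter(keys)
theorem duble_dict_count_loop (ls : List (String × String)) :
    ls.foldl (fun d i =>
        let key := i.1
        if d.contains key then d.modify key 0 (· + 1) else d.insert key 1)
      PySem.Dict.empty
      = PySem.Dict.counter (ls.map (fun i => i.1)) := by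
  rw [PySem.Dict.counter_eq_foldl, List.foldl_map]
  apply PySem.List.foldl_congr_mem
  intro d i _
  exact countStep_eq_modify d i.1

-- A computes the canonical value
theorem duble_dict_eq_canon (ls : List (String × String)) :
    duble_dict ls = pvCanon (ls.map (fun i => i.1)) := by
  unfold duble_dict
  simp only [duble_dict_count_loop]
  rw [PySem.List.foldl_ite_eq_foldl_filter, PySem.Dict.items_counter, List.filter_map]
  rw [PySem.Dict.items_foldl_insert_fresh _ (fun p : String × Int => p.1) (fun p : String × Int => p.2)
      PySem.Dict.empty (by intro a _; simp [PySem.Dict.contains, PySem.Dict.empty]) ?_]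
  · simp only [PySem.Dict.empty, List.nil_append, Function.comp_def, List.map_map]
    rfl
  · have hsub : (List.filter ((fun kv : String × Int => decide (kv.2 > 1)) ∘ fun k => (k, (List.count k (ls.map (fun i => i.1)) : Int)))
        (PySem.Set.ofList (ls.map (fun i => i.1)))).Sublist (PySem.Set.ofList (ls.map (fun i => i.1))) :=
      List.filter_sublist
    have := (PySem.Set.nodup_ofList (ls.map (fun i => i.1))).sublist hsub
    simpa [List.map_map, Function.comp_def] using this

-- set(filter p xs) = filter p (set(xs))
theorem ofList_filter (p : String → Bool) (l : List String) :
    PySem.Set.ofList (l.filter p) = (PySem.Set.ofList l).filter p := by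
  induction l with
  | nil => simp [PySem.Set.ofList_nil]
  | cons x t ih =>
    rw [List.filter_cons, PySem.Set.ofList_cons, PySem.Set.discard, List.filter_cons]
    by_cases hx : p x = true
    · rw [if_pos hx, if_pos hx, PySem.Set.ofList_cons, ih, PySem.Set.discard,
        List.filter_comm]
    · have hx' : p x = false := by simpa using hx
      rw [hx', if_neg (by simp), if_neg (by simp), ih, List.filter_filter]
      apply List.filter_congr
      intro a _
      by_cases hak : a = x
      · subst hak; simp [hx']
      · simp [hak]

-- removing all occurrences of k removes count k elements
theorem length_filter_ne (t : List String) (k : String) :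
    (t.filter (fun x => x != k)).length + t.count k = t.length := by
  induction t with
  | nil => simp
  | cons y t ih =>
    by_cases hy : y = k
    · subst hy; simp only [List.filter_cons, bne_self_eq_false, Bool.false_eq_true, if_false,
        List.count_cons_self, List.length_cons]
      omega
    · have h1 : (y != k) = true := by simpa using hy
      have h3 : (y == k) = false := by simpa using hy
      simp only [List.filter_cons, h1, if_true, List.count_cons, h3,
        Bool.false_eq_true, if_false, List.length_cons]
      omega

-- the canonical value decomposes along one partition step
theorem pvCanon_cons (k : String) (t : List String) :
    pvCanon (k :: t) =
      (if ((((k :: t).count k : Int)) > 1) then [(k, (((k :: t).count k : Int)))] else [])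
        ++ pvCanon (t.filter (fun x => x != k)) := by
  unfold pvCanon
  rw [PySem.Set.ofList_cons, PySem.Set.discard, ofList_filter]
  rw [List.filter_cons]
  have hdisc : (PySem.Set.ofList t).filter (fun y => !(y == k))
      = (PySem.Set.ofList t).filter (fun x => x != k) := by
    apply List.filter_congr; intro a _; simp [bne]
  rw [hdisc]
  have hcount : ∀ a ∈ (PySem.Set.ofList t).filter (fun x => x != k),
      ((t.filter (fun x => x != k)).count a = (k :: t).count a) := by
    intro a ha
    have hne : ((fun x => x != k) a) = true := (List.mem_filter.mp ha).2
    have hnek : a ≠ k := by simpa using hne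
    rw [List.count_filter (p := fun x => x != k) hne, List.count_cons]
    simp [Ne.symm hnek]
  have hfilter : List.filter (fun a => decide ((((k :: t).count a : Int)) > 1))
        (List.filter (fun x => x != k) (PySem.Set.ofList t))
      = List.filter (fun a => decide ((((t.filter (fun x => x != k)).count a : Int)) > 1))
        (List.filter (fun x => x != k) (PySem.Set.ofList t)) := by
    apply List.filter_congr
    intro a ha
    rw [hcount a ha]
  by_cases hk : (decide ((((k :: t).count k : Int)) > 1)) = true
  · rw [if_pos hk, if_pos (by simpa using hk)]
    rw [List.map_cons, hfilter]
    rw [List.singleton_append]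
    congr 1
    apply List.map_congr_left
    intro a ha
    have ha' := List.mem_filter.mp ha
    rw [hcount a ha'.1]
  · rw [if_neg hk, if_neg (by simpa using hk)]
    rw [hfilter, List.nil_append]
    apply List.map_congr_left
    intro a ha
    have ha' := List.mem_filter.mp ha
    rw [hcount a ha'.1]

-- the worklist loop appends the canonical value (fuel induction on the worklist length)
theorem pvLoop_items : ∀ (n : Nat) (l : List String), l.length ≤ n →
    ∀ (d : PySem.Dict String Int), (∀ k ∈ l, d.contains k = false) →
      (pvLoop l d).items = d.items ++ pvCanon l := by
  intro n
  induction n with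
  | zero =>
    intro l hl d _
    have : l = [] := List.length_eq_zero_iff.mp (Nat.le_zero.mp hl)
    subst this
    simp [pvLoop, pvCanon, PySem.Set.ofList_nil]
  | succ n ih =>
    intro l hl d hd
    match l with
    | [] => simp [pvLoop, pvCanon, PySem.Set.ofList_nil]
    | k :: t =>
      rw [pvLoop]
      have hrest : (k :: t).filter (fun x => x != k) = t.filter (fun x => x != k) := by
        simp
      have hcnt := length_filter_ne t k
      have hc : (((k :: t).length : Int) - ((List.filter (fun x => x != k) t).length : Int))
          = ((k :: t).count k : Int) := by
        rw [List.count_cons_self, List.length_cons]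
        push_cast
        omega
      simp only [hrest]
      rw [hc]
      have hl' : t.length + 1 ≤ n + 1 := by simpa using hl
      have hlen : (t.filter (fun x => x != k)).length ≤ n := by
        have := List.length_filter_le (fun x => x != k) t
        omega
      have hmem : ∀ j ∈ t.filter (fun x => x != k), j ∈ t ∧ (j == k) = false := by
        intro j hj
        have h := List.mem_filter.mp hj
        exact ⟨h.1, by simpa using h.2⟩
      by_cases hgt : (((k :: t).count k : Int)) > 1
      · rw [if_pos hgt]
        rw [ih _ hlen _ ?_]
        · rw [PySem.Dict.items_insert_of_not_contains _ _ (hd k (by simp)),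
            pvCanon_cons, if_pos hgt, List.append_assoc]
        · intro j hj
          rcases hmem j hj with ⟨hjt, hjk⟩
          rw [PySem.Dict.contains_insert]
          simp [hjk, hd j (by simp [hjt])]
      · rw [if_neg hgt]
        rw [ih _ hlen _ ?_]
        · rw [pvCanon_cons, if_neg hgt, List.nil_append]
        · intro j hj
          exact hd j (by simp [(hmem j hj).1])

-- B computes the canonical value
theorem duble_dict_alt_eq_canon (ls : List (String × String)) :
    duble_dict_alt ls = pvCanon (ls.map (fun i => i.1)) := by
  unfold duble_dict_alt
  rw [pvLoop_items (ls.map (fun i => i.1)).length _ le_rfl PySem.Dict.empty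
    (by intro k _; simp [PySem.Dict.contains, PySem.Dict.empty])]
  simp [PySem.Dict.empty]

-- ===== VERDICT (by name: the statement is the Claim_ definition above) =====
theorem duble_dict_spec : Claim_equal_duble_dict := by
  intro ls _
  unfold Spec_duble_dict
  rw [duble_dict_eq_canon, duble_dict_alt_eq_canon]
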